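-- pv_equiv track=rewrite | github.com/PyroMantra/warpedoriginal | patch_dedupe_login_google.py | block_bounds
-- ===== SOURCE A (Python) =====
-- def block_bounds(s, start_idx):
--     # start at beginning of decorator line
--     start = s.rfind("\n", 0, start_idx)
--     start = 0 if start == -1 else start + 1
--     # end at next decorator or __main__ guard or EOF
--     next_decos = [s.find("\n@app.route(", start_idx+1), s.find("\n@bp.route(", start_idx+1)]
--     next_guard = s.find("\nif __name__", start_idx+1)
--     candidates = [i for i in next_decos+[next_guard] if i != -1]
--     end = min(candidates) if candidates else len(s)
--     return start, end
-- ===== SOURCE B (Python) =====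
-- def block_bounds(s, start_idx):
--     # start of the line containing start_idx
--     start = s.rfind("\n", 0, start_idx)
--     start = 0 if start == -1 else start + 1
--     # hop from newline to newline; stop at the first one opening a boundary line
--     boundaries = ("@app.route(", "@bp.route(", "if __name__")
--     end = len(s)
--     j = s.find("\n", start_idx + 1)
--     while j != -1:
--         if s.startswith(boundaries, j + 1):
--             end = j
--             break
--         j = s.find("\n", j + 1)
--     return start, end
-- ===== Notes on version B (the rewrite author's own statement) =====
-- stated objective: alternative
-- what changed: A runs three independent whole-string find() scans for the full markers, filters the misses and takes the min; B hops from newline to newline with a single repeated find('\n', ...) and stops at the first newline followed by any of the three boundary markers.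
import Mathlib
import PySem

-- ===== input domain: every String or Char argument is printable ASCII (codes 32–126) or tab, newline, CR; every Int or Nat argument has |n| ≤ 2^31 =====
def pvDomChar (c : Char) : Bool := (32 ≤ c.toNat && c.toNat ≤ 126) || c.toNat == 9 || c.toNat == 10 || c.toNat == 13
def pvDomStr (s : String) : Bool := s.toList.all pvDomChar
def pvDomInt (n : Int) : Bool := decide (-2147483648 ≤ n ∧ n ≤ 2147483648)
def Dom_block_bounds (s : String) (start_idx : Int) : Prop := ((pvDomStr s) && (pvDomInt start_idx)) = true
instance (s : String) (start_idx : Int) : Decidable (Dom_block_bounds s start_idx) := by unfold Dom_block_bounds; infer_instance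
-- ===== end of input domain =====

-- B replaces A's three whole-string find() passes plus the filter-and-min step by a single
-- newline-hopping scan (repeated find('\n', …)) that stops at the first newline followed by a
-- boundary marker (objective: alternative).

-- ===== PORT A =====
def block_bounds (s : String) (start_idx : Int) : Int × Int :=
  let start0 := PySem.Str.rfindFrom s "\n" 0 (some start_idx)
  let start := if start0 = -1 then 0 else start0 + 1
  let next_decos : List Int :=
    [PySem.Str.findFrom s "\n@app.route(" (start_idx + 1) none,
     PySem.Str.findFrom s "\n@bp.route(" (start_idx + 1) none]
  let next_guard : Int := PySem.Str.findFrom s "\nif __name__" (start_idx + 1) none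
  let candidates := (next_decos ++ [next_guard]).filter (fun i => i != -1)
  let e : Int :=
    match PySem.List.min? candidates (fun x => x) with
    | some m => m
    | none => PySem.Str.len s
  (start, e)

-- ===== PORT B =====
-- termination facts for B's while-loop, cited by pvNlLoop's decreasing_by
lemma pv_found (cs sub : List Char) (k : Nat) (hk : k ≤ cs.length) (hsub : sub ≠ [])
    (h : PySem.Chars.findFrom cs sub (k : Int) none ≠ -1) :
    (k : Int) ≤ PySem.Chars.findFrom cs sub (k : Int) none ∧
    PySem.Chars.findFrom cs sub (k : Int) none < cs.length ∧
    sub <+: cs.drop (PySem.Chars.findFrom cs sub (k : Int) none).toNat ∧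
    ∀ i : Nat, k ≤ i → (i : Int) < PySem.Chars.findFrom cs sub (k : Int) none → ¬ sub <+: cs.drop i := by
  obtain ⟨h1, h2, h3⟩ := PySem.Chars.findFrom_natCast_spec cs sub k hk h
  have hk0 : (0 : Int) ≤ PySem.Chars.findFrom cs sub (k : Int) none := le_trans (by omega) h1
  have hlen : (PySem.Chars.findFrom cs sub (k : Int) none).toNat < cs.length := by
    by_contra hcon
    rw [List.drop_eq_nil_iff.2 (by omega)] at h2
    exact hsub (List.prefix_nil.1 h2)
  refine ⟨h1, by omega, h2, ?_⟩
  intro i hi hlt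
  exact h3 i hi (by omega)

lemma pv_find_nl_bound (cs : List Char) (j : Int) (h0 : 0 ≤ j) (h1 : j < (cs.length : Int)) :
    PySem.Chars.findFrom cs "\n".toList (j + 1) none = -1 ∨
      (j + 1 ≤ PySem.Chars.findFrom cs "\n".toList (j + 1) none ∧
       PySem.Chars.findFrom cs "\n".toList (j + 1) none < (cs.length : Int)) := by
  by_cases h : PySem.Chars.findFrom cs "\n".toList (j + 1) none = -1
  · exact Or.inl h
  · have hcast : ((j.toNat + 1 : Nat) : Int) = j + 1 := by omega
    rw [← hcast] at h ⊢
    obtain ⟨a, b, _, _⟩ := pv_found cs "\n".toList (j.toNat + 1) (by omega) (by decide) h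
    exact Or.inr ⟨a, by exact_mod_cast b⟩

-- B's while-loop; the guard `j < 0 ∨ len ≤ j` is Python's `j != -1` test
-- (findFrom only ever produces -1 or a position in [0, len)).
def pvNlLoop (cs : List Char) (j : Int) : Int :=
  if h : j < 0 ∨ (cs.length : Int) ≤ j then (cs.length : Int)
  else if PySem.Chars.startswith (cs.drop (j.toNat + 1)) "@app.route(".toList
        || PySem.Chars.startswith (cs.drop (j.toNat + 1)) "@bp.route(".toList
        || PySem.Chars.startswith (cs.drop (j.toNat + 1)) "if __name__".toList
    then j
    else pvNlLoop cs (PySem.Chars.findFrom cs "\n".toList (j + 1) none)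
termination_by if j < 0 then 0 else cs.length - j.toNat
decreasing_by
  rcases pv_find_nl_bound cs j (by omega) (by omega) with hc | ⟨hc1, hc2⟩
  · rw [hc]; split_ifs <;> omega
  · split_ifs <;> omega

def block_bounds_alt (s : String) (start_idx : Int) : Int × Int :=
  let start0 := PySem.Str.rfindFrom s "\n" 0 (some start_idx)
  let start := if start0 = -1 then 0 else start0 + 1
  (start, pvNlLoop s.toList (PySem.Str.findFrom s "\n" (start_idx + 1) none))

-- ===== PRECONDITION & SPEC =====
def Spec_block_bounds (s : String) (start_idx : Int) (out : Int × Int) : Prop := out = block_bounds_alt s start_idx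
instance (s : String) (start_idx : Int) (out : Int × Int) : Decidable (Spec_block_bounds s start_idx out) := by unfold Spec_block_bounds; infer_instance

-- ===== CLAIM (what is proved, stated in full; the proofs are below) =====
def Claim_equal_block_bounds : Prop := ∀ (s : String) (start_idx : Int), Dom_block_bounds s start_idx → Spec_block_bounds s start_idx (block_bounds s start_idx)

-- ===== LEMMAS AND PROOFS =====

-- "some marker starts at position i"
def pvHit (cs : List Char) (i : Nat) : Prop :=
  "\n@app.route(".toList <+: cs.drop i ∨ "\n@bp.route(".toList <+: cs.drop i
    ∨ "\nif __name__".toList <+: cs.drop i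

-- reference first-hit scan, used only to relate the two ports
def pvScanMarker (cs : List Char) (i : Nat) : Int :=
  if _h : i < cs.length then
    if PySem.Chars.startswith (cs.drop i) "\n@app.route(".toList
       || PySem.Chars.startswith (cs.drop i) "\n@bp.route(".toList
       || PySem.Chars.startswith (cs.drop i) "\nif __name__".toList
    then (i : Int) else pvScanMarker cs (i + 1)
  else (cs.length : Int)
termination_by cs.length - i

lemma pv_prefix_drop_infix (cs sub : List Char) (k i : Nat) (hki : k ≤ i)
    (h : sub <+: cs.drop i) : sub <:+: cs.drop k := by
  obtain ⟨t, ht⟩ := h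
  have hd : cs.drop i = (cs.drop k).drop (i - k) := by
    rw [List.drop_drop]; congr 1; omega
  obtain ⟨u, hu⟩ := List.drop_suffix (i - k) (cs.drop k)
  exact ⟨u, t, by rw [List.append_assoc, ht, hd, hu]⟩

lemma pv_absent (cs sub : List Char) (k : Nat) (hk : k ≤ cs.length)
    (h : PySem.Chars.findFrom cs sub (k : Int) none = -1) :
    ∀ i : Nat, k ≤ i → ¬ sub <+: cs.drop i := by
  intro i hi hpre
  exact ((PySem.Chars.findFrom_natCast_eq_neg_one_iff cs sub k hk).1 h)
    (pv_prefix_drop_infix cs sub k i hi hpre)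

lemma pv_findFrom_norm (cs sub : List Char) (p : Int) :
    PySem.Chars.findFrom cs sub p none =
      PySem.Chars.findFrom cs sub (if p < 0 then (if p + cs.length < 0 then 0 else p + cs.length) else p) none := by
  simp only [PySem.Chars.findFrom]
  split_ifs <;> first | rfl | omega

lemma pv_findFrom_past (cs sub : List Char) (q : Int) (h : (cs.length : Int) < q) :
    PySem.Chars.findFrom cs sub q none = -1 := by
  simp only [PySem.Chars.findFrom]
  split_ifs <;> first | rfl | omega

lemma pvScanMarker_past (cs : List Char) (k : Nat) (h : cs.length ≤ k) :
    pvScanMarker cs k = (cs.length : Int) := by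
  rw [pvScanMarker, dif_neg (by omega)]

-- scan characterisation: the result is the first hit position in [k, n), else n
lemma pvScanMarker_spec (cs : List Char) (k : Nat) (hk : k ≤ cs.length) :
    k ≤ pvScanMarker cs k ∧ pvScanMarker cs k ≤ cs.length ∧
    (∀ i : Nat, k ≤ i → (i : Int) < pvScanMarker cs k → ¬ pvHit cs i) ∧
    ((pvScanMarker cs k : Int) = cs.length ∨ pvHit cs (pvScanMarker cs k).toNat) := by
  induction k using pvScanMarker.induct (cs := cs) with
  | case1 k h hc =>
    rw [pvScanMarker, dif_pos h, if_pos hc]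
    refine ⟨le_refl _, by exact_mod_cast h.le, ?_, Or.inr ?_⟩
    · intro i hi hlt; exact absurd hlt (by exact_mod_cast Nat.not_lt.2 hi)
    · simp only [Int.toNat_natCast]
      rcases Bool.or_eq_true_iff.1 hc with h' | h'
      · rcases Bool.or_eq_true_iff.1 h' with h'' | h''
        · exact Or.inl ((PySem.Chars.startswith_iff _ _).1 h'')
        · exact Or.inr (Or.inl ((PySem.Chars.startswith_iff _ _).1 h''))
      · exact Or.inr (Or.inr ((PySem.Chars.startswith_iff _ _).1 h'))
  | case2 k h hc ih =>
    rw [pvScanMarker, dif_pos h, if_neg hc]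
    obtain ⟨ih1, ih2, ih3, ih4⟩ := ih (by omega)
    refine ⟨by omega, ih2, ?_, ih4⟩
    intro i hi hlt
    rcases Nat.eq_or_lt_of_le hi with rfl | hi'
    · intro hhit
      apply hc
      unfold pvHit at hhit
      simp only [Bool.or_eq_true_iff, PySem.Chars.startswith_iff]
      rcases hhit with h' | h' | h'
      · exact Or.inl (Or.inl h')
      · exact Or.inl (Or.inr h')
      · exact Or.inr h'
    · exact ih3 i (by omega) hlt
  | case3 k h =>
    rw [pvScanMarker, dif_neg h]
    refine ⟨by omega, le_refl _, ?_, Or.inl rfl⟩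
    intro i hi hlt; omega

-- the filter-and-min end equals the scan end (for a normalised in-range start)
lemma pv_end_eq (cs : List Char) (k : Nat) (hk : k ≤ cs.length) :
    (match PySem.List.min?
        (([PySem.Chars.findFrom cs "\n@app.route(".toList (k : Int) none,
           PySem.Chars.findFrom cs "\n@bp.route(".toList (k : Int) none] ++
          [PySem.Chars.findFrom cs "\nif __name__".toList (k : Int) none]).filter
          (fun i => i != -1)) (fun x => x) with
      | some m => m
      | none => (cs.length : Int)) = pvScanMarker cs k := by
  obtain ⟨hS1, hS2, hS3, hS4⟩ := pvScanMarker_spec cs k hk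
  split
  case h_1 m heq =>
    have hmem := PySem.List.min?_mem heq
    have hmin := PySem.List.min?_isMin heq
    rw [List.mem_filter] at hmem
    obtain ⟨hmem, hne⟩ := hmem
    have hne' : m ≠ -1 := by simpa using hne
    have hmfacts : (k : Int) ≤ m ∧ m < cs.length ∧ pvHit cs m.toNat := by
      simp only [List.cons_append, List.nil_append, List.mem_cons] at hmem
      rcases hmem with rfl | rfl | rfl | h0
      · obtain ⟨a, b, c, _⟩ := pv_found cs "\n@app.route(".toList k hk (by decide) hne'
        exact ⟨a, b, Or.inl c⟩
      · obtain ⟨a, b, c, _⟩ := pv_found cs "\n@bp.route(".toList k hk (by decide) hne'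
        exact ⟨a, b, Or.inr (Or.inl c)⟩
      · obtain ⟨a, b, c, _⟩ := pv_found cs "\nif __name__".toList k hk (by decide) hne'
        exact ⟨a, b, Or.inr (Or.inr c)⟩
      · exact absurd h0 (List.not_mem_nil)
    obtain ⟨hm1, hm2, hm3⟩ := hmfacts
    have hlow : ∀ i : Nat, k ≤ i → (i : Int) < m → ¬ pvHit cs i := by
      intro i hi hlt hhit
      have key : ∀ sub : List Char, sub ≠ [] → sub <+: cs.drop i →
          (PySem.Chars.findFrom cs sub (k : Int) none) ∈
            ([PySem.Chars.findFrom cs "\n@app.route(".toList (k : Int) none,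
              PySem.Chars.findFrom cs "\n@bp.route(".toList (k : Int) none] ++
             [PySem.Chars.findFrom cs "\nif __name__".toList (k : Int) none]) → False := by
        intro sub hsub hpre hmem2
        have hfne : PySem.Chars.findFrom cs sub (k : Int) none ≠ -1 := by
          intro h0
          exact pv_absent cs sub k hk h0 i hi hpre
        obtain ⟨a, b, c, d⟩ := pv_found cs sub k hk hsub hfne
        have : ¬ ((i : Int) < PySem.Chars.findFrom cs sub (k : Int) none) := fun hx => d i hi hx hpre
        have hmle : m ≤ PySem.Chars.findFrom cs sub (k : Int) none := by
          have := hmin _ (List.mem_filter.2 ⟨hmem2, by simpa using hfne⟩)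
          simpa using this
        omega
      rcases hhit with h' | h' | h'
      · exact key _ (by decide) h' (by simp)
      · exact key _ (by decide) h' (by simp)
      · exact key _ (by decide) h' (by simp)
    rcases lt_trichotomy m (pvScanMarker cs k) with hlt | he | hgt
    · exfalso
      have h0 : (0 : Int) ≤ m := le_trans (by omega) hm1
      exact (hS3 m.toNat (by omega) (by omega)) hm3
    · exact he
    · exfalso
      have hSnn : (0 : Int) ≤ pvScanMarker cs k := le_trans (by omega) hS1
      rcases hS4 with he | hhit
      · omega
      · exact hlow (pvScanMarker cs k).toNat (by omega) (by omega) hhit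
  case h_2 heq =>
    have hnil := (PySem.List.min?_eq_none_iff _ _).1 heq
    rw [List.filter_eq_nil_iff] at hnil
    have habs : ∀ i : Nat, k ≤ i → ¬ pvHit cs i := by
      intro i hi hhit
      rcases hhit with h' | h' | h'
      · exact pv_absent cs _ k hk (by simpa using hnil _ (by simp)) i hi h'
      · exact pv_absent cs _ k hk (by simpa using hnil _ (by simp : PySem.Chars.findFrom cs "\n@bp.route(".toList (k : Int) none ∈ _)) i hi h'
      · exact pv_absent cs _ k hk (by simpa using hnil _ (by simp : PySem.Chars.findFrom cs "\nif __name__".toList (k : Int) none ∈ _)) i hi h'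
    rcases hS4 with he | hhit
    · omega
    · exfalso
      have hSnn : (0 : Int) ≤ pvScanMarker cs k := le_trans (by omega) hS1
      exact habs (pvScanMarker cs k).toNat (by omega) hhit

-- the marker lists split off their leading newline
lemma pv_marker_split :
    "\n@app.route(".toList = '\n' :: "@app.route(".toList ∧
    "\n@bp.route(".toList = '\n' :: "@bp.route(".toList ∧
    "\nif __name__".toList = '\n' :: "if __name__".toList := by decide

-- one step of the scan over a non-hit position
lemma pvScanMarker_step (cs : List Char) (k : Nat) (h : k < cs.length) (hnh : ¬ pvHit cs k) :
    pvScanMarker cs k = pvScanMarker cs (k + 1) := by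
  rw [pvScanMarker, dif_pos h, if_neg ?_]
  intro hc
  apply hnh
  unfold pvHit
  rcases Bool.or_eq_true_iff.1 hc with h' | h'
  · rcases Bool.or_eq_true_iff.1 h' with h'' | h''
    · exact Or.inl ((PySem.Chars.startswith_iff _ _).1 h'')
    · exact Or.inr (Or.inl ((PySem.Chars.startswith_iff _ _).1 h''))
  · exact Or.inr (Or.inr ((PySem.Chars.startswith_iff _ _).1 h'))

lemma pvScanMarker_skip (cs : List Char) (d : Nat) : ∀ k : Nat, k + d ≤ cs.length →
    (∀ i : Nat, k ≤ i → i < k + d → ¬ pvHit cs i) → pvScanMarker cs k = pvScanMarker cs (k + d) := by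
  induction d with
  | zero => intro k _ _; rfl
  | succ d ih =>
    intro k hk hno
    rw [pvScanMarker_step cs k (by omega) (hno k le_rfl (by omega))]
    rw [ih (k + 1) (by omega) (fun i hi hlt => hno i (by omega) (by omega))]
    congr 1
    omega

-- a hit implies a newline at that position
lemma pv_hit_newline (cs : List Char) (i : Nat) (h : pvHit cs i) : "\n".toList <+: cs.drop i := by
  obtain ⟨e1, e2, e3⟩ := pv_marker_split
  rcases h with h' | h' | h' <;>
    [rw [e1] at h'; rw [e2] at h'; rw [e3] at h'] <;>
    exact List.IsPrefix.trans ⟨_, rfl⟩ h'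

-- B's newline-hopping loop computes the first-hit scan
lemma pvNl_eq_scan (cs : List Char) (d : Nat) : ∀ k : Nat, cs.length - k ≤ d → k ≤ cs.length →
    pvNlLoop cs (PySem.Chars.findFrom cs "\n".toList (k : Int) none) = pvScanMarker cs k := by
  induction d with
  | zero =>
    intro k hd hk
    have hke : k = cs.length := by omega
    subst hke
    have hfe : PySem.Chars.findFrom cs "\n".toList (cs.length : Int) none = -1 := by
      rw [PySem.Chars.findFrom_natCast_eq_neg_one_iff cs _ cs.length le_rfl]
      simp
    rw [hfe, pvNlLoop, dif_pos (by omega), pvScanMarker_past cs _ le_rfl]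
  | succ d ih =>
    intro k hd hk
    by_cases hfe : PySem.Chars.findFrom cs "\n".toList (k : Int) none = -1
    · rw [hfe, pvNlLoop, dif_pos (by omega)]
      have habs : ∀ i : Nat, k ≤ i → ¬ pvHit cs i := fun i hi hhit =>
        pv_absent cs "\n".toList k hk hfe i hi (pv_hit_newline cs i hhit)
      obtain ⟨hS1, hS2, hS3, hS4⟩ := pvScanMarker_spec cs k hk
      rcases hS4 with he | hhit
      · omega
      · exact absurd hhit (habs _ (by omega))
    · obtain ⟨hj1, hj2, hj3, hj4⟩ := pv_found cs "\n".toList k hk (by decide) hfe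
      set j := PySem.Chars.findFrom cs "\n".toList (k : Int) none with hjdef
      have hj0 : 0 ≤ j := le_trans (by omega) hj1
      set jn := j.toNat with hjn
      have hjlen : jn < cs.length := by omega
      have hdropj : cs.drop jn = '\n' :: cs.drop (jn + 1) := by
        obtain ⟨t, ht⟩ := hj3
        rw [List.drop_eq_getElem_cons hjlen] at ht
        have h0 : ('\n' : Char) :: t = cs[jn] :: cs.drop (jn + 1) := by simpa using ht
        injection h0 with h1 h2
        rw [List.drop_eq_getElem_cons hjlen, ← h1]
      have hnohit_lt : ∀ i : Nat, k ≤ i → i < jn → ¬ pvHit cs i := by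
        intro i hi hlt hhit
        exact hj4 i hi (by omega) (pv_hit_newline cs i hhit)
      rw [pvNlLoop, dif_neg (by omega)]
      by_cases hhb : (PySem.Chars.startswith (cs.drop (j.toNat + 1)) "@app.route(".toList
        || PySem.Chars.startswith (cs.drop (j.toNat + 1)) "@bp.route(".toList
        || PySem.Chars.startswith (cs.drop (j.toNat + 1)) "if __name__".toList) = true
      · rw [if_pos hhb]
        -- hit at jn; show the scan also returns j
        obtain ⟨e1, e2, e3⟩ := pv_marker_split
        have hHit : pvHit cs jn := by
          unfold pvHit
          rw [e1, e2, e3, hdropj]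
          rcases Bool.or_eq_true_iff.1 hhb with h' | h'
          · rcases Bool.or_eq_true_iff.1 h' with h'' | h''
            · exact Or.inl (List.cons_prefix_cons.2 ⟨rfl, (PySem.Chars.startswith_iff _ _).1 h''⟩)
            · exact Or.inr (Or.inl (List.cons_prefix_cons.2 ⟨rfl, (PySem.Chars.startswith_iff _ _).1 h''⟩))
          · exact Or.inr (Or.inr (List.cons_prefix_cons.2 ⟨rfl, (PySem.Chars.startswith_iff _ _).1 h'⟩))
        obtain ⟨hS1, hS2, hS3, hS4⟩ := pvScanMarker_spec cs k hk
        rcases lt_trichotomy (pvScanMarker cs k) j with hlt | he | hgt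
        · exfalso
          have hSnn : (0 : Int) ≤ pvScanMarker cs k := le_trans (by omega) hS1
          rcases hS4 with he' | hhit
          · omega
          · exact hnohit_lt (pvScanMarker cs k).toNat (by omega) (by omega) hhit
        · exact he.symm
        · exact absurd hHit (hS3 jn (by omega) (by omega))
      · rw [if_neg hhb]
        have hnohit_j : ¬ pvHit cs jn := by
          intro hhit
          apply hhb
          obtain ⟨e1, e2, e3⟩ := pv_marker_split
          unfold pvHit at hhit
          rw [e1, e2, e3, hdropj] at hhit
          simp only [Bool.or_eq_true_iff, PySem.Chars.startswith_iff]
          rcases hhit with h' | h' | h'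
          · exact Or.inl (Or.inl (List.cons_prefix_cons.1 h').2)
          · exact Or.inl (Or.inr (List.cons_prefix_cons.1 h').2)
          · exact Or.inr (List.cons_prefix_cons.1 h').2
        have hcast : ((jn + 1 : Nat) : Int) = j + 1 := by omega
        rw [← hcast, ih (jn + 1) (by omega) (by omega)]
        have := pvScanMarker_skip cs (jn + 1 - k) k (by omega) ?_
        · rw [this]; congr 1; omega
        · intro i hi hlt
          rcases Nat.lt_or_ge i jn with hc | hc
          · exact hnohit_lt i hi hc
          · have : i = jn := by omega
            subst this; exact hnohit_j

lemma pv_main_eq (s : String) (start_idx : Int) : block_bounds s start_idx = block_bounds_alt s start_idx := by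
  simp only [block_bounds, block_bounds_alt, PySem.Str.findFrom_eq, PySem.Str.len, Prod.mk.injEq]
  refine ⟨trivial, ?_⟩
  rw [pv_findFrom_norm s.toList _ (start_idx + 1), pv_findFrom_norm s.toList _ (start_idx + 1),
      pv_findFrom_norm s.toList _ (start_idx + 1), pv_findFrom_norm s.toList "\n".toList (start_idx + 1)]
  set q : Int := if start_idx + 1 < 0 then (if start_idx + 1 + (s.toList.length : Int) < 0 then 0 else start_idx + 1 + (s.toList.length : Int)) else start_idx + 1 with hq
  have hq0 : 0 ≤ q := by rw [hq]; split_ifs <;> omega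
  by_cases hle : q ≤ (s.toList.length : Int)
  · have hkk : ((q.toNat : Nat) : Int) = q := Int.toNat_of_nonneg hq0
    rw [← hkk, pv_end_eq s.toList q.toNat (by omega), pvNl_eq_scan s.toList s.toList.length q.toNat (by omega) (by omega)]
  · have hpast : (s.toList.length : Int) < q := by omega
    rw [pv_findFrom_past _ _ _ hpast, pv_findFrom_past _ _ _ hpast, pv_findFrom_past _ _ _ hpast,
        pv_findFrom_past _ _ _ hpast, pvNlLoop, dif_pos (by omega)]
    rfl

-- ===== VERDICT (by name: the statement is the Claim_ definition above) =====
theorem block_bounds_spec : Claim_equal_block_bounds := by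
  intro s start_idx _
  unfold Spec_block_bounds
  exact pv_main_eq s start_idx
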